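-- pv_equiv track=rewrite | github.com/Rvioleck/python_noj_exmination | noj_040最接近的分数.py | most_common_divisor
-- ===== SOURCE A (Python) =====
-- def most_common_divisor(num1, num2):
--     # 求num1和num2的最大公因子
--     if num2 > num1:
--         num1, num2 = num2, num1
--     divisor = 1 # 返回值最大公因子
--     i = 1 # 循环出口标志
--     while i <= num2:
--         if num1%i==0 and num2%i==0:
--             if i >= divisor:
--                 divisor = i
--         i += 1
--     if divisor == 1:
--         return False
--     else:
--         return True
-- ===== SOURCE B (Python) =====
-- def most_common_divisor(num1, num2):
--     # True iff num1 and num2 share a divisor greater than 1.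
--     m = min(num1, num2)
--     d1 = {i for i in range(2, m + 1) if num1 % i == 0}
--     d2 = {i for i in range(2, m + 1) if num2 % i == 0}
--     return bool(d1 & d2)
-- ===== Notes on version B (the rewrite author's own statement) =====
-- stated objective: simpler
-- what changed: Replaces A's while-loop that tracks the maximum common divisor with two divisor-set comprehensions over range(2, min+1) and a set intersection whose truthiness is the answer.
import Mathlib
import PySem

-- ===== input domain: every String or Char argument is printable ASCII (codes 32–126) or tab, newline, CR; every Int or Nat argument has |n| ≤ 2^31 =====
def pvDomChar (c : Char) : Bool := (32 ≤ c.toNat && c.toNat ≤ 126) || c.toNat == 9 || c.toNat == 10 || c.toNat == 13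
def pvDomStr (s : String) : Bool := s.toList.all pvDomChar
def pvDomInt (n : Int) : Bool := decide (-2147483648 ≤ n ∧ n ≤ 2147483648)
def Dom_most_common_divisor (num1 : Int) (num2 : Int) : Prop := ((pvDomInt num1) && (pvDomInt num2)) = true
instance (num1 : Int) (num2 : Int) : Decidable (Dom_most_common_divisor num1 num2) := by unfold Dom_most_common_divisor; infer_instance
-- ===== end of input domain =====

-- B replaces A's running-maximum while-loop with two divisor-set comprehensions and a set
-- intersection (simpler decomposition; same asymptotic cost).

-- ===== PORT A =====
-- the while loop: fuel counts the remaining iterations (i goes 1,2,…,num2)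
def mcdLoop (n1 n2 : Int) : Nat → Int → Int → Int
  | 0, _, d => d
  | f + 1, i, d =>
      mcdLoop n1 n2 f (i + 1)
        (if PySem.Int.mod n1 i = 0 ∧ PySem.Int.mod n2 i = 0 then
           (if i ≥ d then i else d)
         else d)

def most_common_divisor (num1 : Int) (num2 : Int) : Bool :=
  let p := if num2 > num1 then (num2, num1) else (num1, num2)
  let divisor := mcdLoop p.1 p.2 p.2.toNat 1 1
  if divisor = 1 then false else true

-- ===== PORT B =====
def most_common_divisor_alt (num1 : Int) (num2 : Int) : Bool :=
  let m := min num1 num2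
  let d1 : PySem.Set Int :=
    PySem.Set.ofList ((PySem.List.pyRange 2 (m + 1) 1).filter (fun i => PySem.Int.mod num1 i == 0))
  let d2 : PySem.Set Int :=
    PySem.Set.ofList ((PySem.List.pyRange 2 (m + 1) 1).filter (fun i => PySem.Int.mod num2 i == 0))
  !(PySem.Set.inter d1 d2).isEmpty

-- ===== PRECONDITION & SPEC =====
def Spec_most_common_divisor (num1 : Int) (num2 : Int) (out : Bool) : Prop := out = most_common_divisor_alt num1 num2
instance (num1 : Int) (num2 : Int) (out : Bool) : Decidable (Spec_most_common_divisor num1 num2 out) := by unfold Spec_most_common_divisor; infer_instance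

-- ===== CLAIM (what is proved, stated in full; the proofs are below) =====
def Claim_equal_most_common_divisor : Prop := ∀ (num1 : Int) (num2 : Int), Dom_most_common_divisor num1 num2 → Spec_most_common_divisor num1 num2 (most_common_divisor num1 num2)

-- ===== LEMMAS AND PROOFS =====

-- the loop never decreases the accumulator
theorem mcdLoop_ge (n1 n2 : Int) (f : Nat) :
    ∀ i d : Int, d ≤ mcdLoop n1 n2 f i d := by
  induction f with
  | zero => intro i d; simp [mcdLoop]
  | succ f ih =>
      intro i d
      simp only [mcdLoop]
      split
      · split
        · exact le_trans (by omega) (ih (i + 1) i)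
        · exact ih (i + 1) d
      · exact ih (i + 1) d

-- characterisation of the loop started with divisor = 1
theorem mcdLoop_one_ne_one (n1 n2 : Int) (f : Nat) :
    ∀ i : Int, 1 ≤ i →
      (mcdLoop n1 n2 f i 1 ≠ 1 ↔
        ∃ j : Int, i ≤ j ∧ j < i + f ∧ 2 ≤ j ∧
          PySem.Int.mod n1 j = 0 ∧ PySem.Int.mod n2 j = 0) := by
  induction f with
  | zero =>
      intro i _
      simp only [mcdLoop]
      constructor
      · intro h; exact absurd rfl h
      · rintro ⟨j, h1, h2, _⟩; omega
  | succ f ih =>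
      intro i hi
      simp only [mcdLoop]
      by_cases hc : PySem.Int.mod n1 i = 0 ∧ PySem.Int.mod n2 i = 0
      · simp only [if_pos hc, if_pos (show i ≥ 1 from hi)]
        by_cases h2 : 2 ≤ i
        · constructor
          · intro _
            exact ⟨i, le_refl i, by omega, h2, hc.1, hc.2⟩
          · intro _
            have := mcdLoop_ge n1 n2 f (i + 1) i
            omega
        · have hi1 : i = 1 := by omega
          subst hi1
          rw [ih (1 + 1) (by omega)]
          constructor
          · rintro ⟨j, hj1, hj2, hj3, hj4⟩
            exact ⟨j, by omega, by omega, hj3, hj4⟩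
          · rintro ⟨j, hj1, hj2, hj3, hj4⟩
            exact ⟨j, by omega, by omega, hj3, hj4⟩
      · simp only [if_neg hc]
        rw [ih (i + 1) (by omega)]
        constructor
        · rintro ⟨j, hj1, hj2, hj3, hj4⟩
          exact ⟨j, by omega, by omega, hj3, hj4⟩
        · rintro ⟨j, hj1, hj2, hj3, hj4, hj5⟩
          refine ⟨j, ?_, by omega, hj3, hj4, hj5⟩
          rcases eq_or_lt_of_le hj1 with h | h
          · exact absurd ⟨h ▸ hj4, h ▸ hj5⟩ hc
          · omega

theorem most_common_divisor_true_iff (num1 num2 : Int) :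
    most_common_divisor num1 num2 = true ↔
      ∃ j : Int, 2 ≤ j ∧ j ≤ min num1 num2 ∧
        PySem.Int.mod num1 j = 0 ∧ PySem.Int.mod num2 j = 0 := by
  unfold most_common_divisor
  by_cases h : num2 > num1
  · simp only [if_pos h]
    split
    · next heq =>
        simp only [Bool.false_eq_true, false_iff]
        rintro ⟨j, hj1, hj2, hj3, hj4⟩
        have := (mcdLoop_one_ne_one num2 num1 num1.toNat 1 (by omega)).mpr
          ⟨j, by omega, by omega, hj1, hj4, hj3⟩
        exact this heq
    · next hne =>
        simp only [true_iff]
        obtain ⟨j, hj1, hj2, hj3, hj4, hj5⟩ :=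
          (mcdLoop_one_ne_one num2 num1 num1.toNat 1 (by omega)).mp hne
        exact ⟨j, hj3, by omega, hj5, hj4⟩
  · simp only [if_neg h]
    split
    · next heq =>
        simp only [Bool.false_eq_true, false_iff]
        rintro ⟨j, hj1, hj2, hj3, hj4⟩
        have := (mcdLoop_one_ne_one num1 num2 num2.toNat 1 (by omega)).mpr
          ⟨j, by omega, by omega, hj1, hj3, hj4⟩
        exact this heq
    · next hne =>
        simp only [true_iff]
        obtain ⟨j, hj1, hj2, hj3, hj4, hj5⟩ :=
          (mcdLoop_one_ne_one num1 num2 num2.toNat 1 (by omega)).mp hne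
        exact ⟨j, hj3, by omega, hj4, hj5⟩

theorem most_common_divisor_alt_true_iff (num1 num2 : Int) :
    most_common_divisor_alt num1 num2 = true ↔
      ∃ j : Int, 2 ≤ j ∧ j ≤ min num1 num2 ∧
        PySem.Int.mod num1 j = 0 ∧ PySem.Int.mod num2 j = 0 := by
  unfold most_common_divisor_alt
  simp only [Bool.not_eq_true', List.isEmpty_eq_false_iff_exists_mem,
    PySem.Set.mem_inter, PySem.Set.mem_ofList, List.mem_filter,
    PySem.List.mem_pyRange_one, beq_iff_eq]
  constructor
  · rintro ⟨j, ⟨⟨hj1, hj2⟩, hd1⟩, ⟨_, hd2⟩⟩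
    exact ⟨j, hj1, by omega, hd1, hd2⟩
  · rintro ⟨j, hj1, hj2, hd1, hd2⟩
    exact ⟨j, ⟨⟨hj1, by omega⟩, hd1⟩, ⟨⟨hj1, by omega⟩, hd2⟩⟩

-- ===== VERDICT (by name: the statement is the Claim_ definition above) =====
theorem most_common_divisor_spec : Claim_equal_most_common_divisor := by
  intro num1 num2 _
  unfold Spec_most_common_divisor
  rw [Bool.eq_iff_iff, most_common_divisor_true_iff, most_common_divisor_alt_true_iff]
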